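-- pv_equiv track=rewrite | github.com/vinayakvind/ams-simulator | simulator/gui/schematic_editor.py | _expand_subckt_line
-- ===== SOURCE A (Python) =====
-- def _expand_subckt_line(
--     line: str, prefix: str, net_map: dict[str, str]
-- ) -> str:
--     """Expand a .SUBCKT body line with prefixed refs and remapped nets.
--
--     Used by load_from_netlist() to inline subcircuit instances. Component
--     reference designators are prefixed with the instance name, port nets
--     are remapped to top-level connections, and internal nets are prefixed
--     to avoid collisions.
--
--     Args:
--         line: A SPICE element line from inside a .SUBCKT body.
--         prefix: Instance prefix for unique naming.
--         net_map: Mapping from subcircuit port names to top-level nets.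
--
--     Returns:
--         Expanded line string, or empty string if unparseable.
--     """
--     tokens = line.split()
--     if not tokens:
--         return ''
--
--     ref = tokens[0]
--     first_char = ref[0].upper()
--
--     new_ref = f"{ref[0]}_{prefix}_{ref[1:]}" if len(ref) > 1 else f"{ref[0]}_{prefix}"
--
--     # Determine which token positions (1-indexed) contain net names
--     net_positions: set[int] = set()
--     if first_char in ('R', 'C', 'L', 'D'):
--         net_positions = {1, 2}
--     elif first_char in ('V', 'I'):
--         net_positions = {1, 2}
--     elif first_char == 'M':
--         net_positions = {1, 2, 3, 4}
--     elif first_char == 'Q':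
--         net_positions = {1, 2, 3}
--     elif first_char in ('E', 'G'):
--         net_positions = {1, 2}
--         if len(tokens) > 3 and tokens[3].upper() in ('VCVS', 'VCCS', 'POLY'):
--             net_positions.update({4, 5})
--         else:
--             net_positions.update({3, 4})
--     else:
--         return line  # Unknown prefix, pass through
--
--     result = [new_ref]
--     for i in range(1, len(tokens)):
--         tok = tokens[i]
--         if i in net_positions:
--             if tok in net_map:
--                 result.append(net_map[tok])
--             elif tok == '0' or tok.lower() == 'gnd':
--                 result.append(tok)
--             else:
--                 result.append(f"{prefix}_{tok}")
--         else:
--             result.append(tok)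
--
--     return ' '.join(result)
-- ===== SOURCE B (Python) =====
-- def _remap_net(tok, prefix, net_map):
--     if tok in net_map:
--         return net_map[tok]
--     if tok == '0' or tok.lower() == 'gnd':
--         return tok
--     return prefix + '_' + tok
--
--
-- def _expand_subckt_line(line, prefix, net_map):
--     # Segment view: after the ref, every device's net tokens form at most two
--     # contiguous runs, so the line is (nets, passthrough, nets, rest) with
--     # per-device segment lengths (k, s, m) -- no index set needed.
--     tokens = line.split()
--     if not tokens:
--         return ''
--
--     ref = tokens[0]
--     fc = ref[0].upper()
--
--     if fc in 'RCLDVI':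
--         k, s, m = 2, 0, 0
--     elif fc == 'M':
--         k, s, m = 4, 0, 0
--     elif fc == 'Q':
--         k, s, m = 3, 0, 0
--     elif fc in 'EG':
--         if len(tokens) > 3 and tokens[3].upper() in ('VCVS', 'VCCS', 'POLY'):
--             k, s, m = 2, 1, 2
--         else:
--             k, s, m = 4, 0, 0
--     else:
--         return line
--
--     new_ref = ref[0] + '_' + prefix + ('_' + ref[1:] if len(ref) > 1 else '')
--     rest = tokens[1:]
--     a, rest2 = rest[:k], rest[k:]
--     b, rest3 = rest2[:s], rest2[s:]
--     c, d = rest3[:m], rest3[m:]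
--     parts = [new_ref] \
--         + [_remap_net(t, prefix, net_map) for t in a] + b \
--         + [_remap_net(t, prefix, net_map) for t in c] + d
--     return ' '.join(parts)
-- ===== Notes on version B (the rewrite author's own statement) =====
-- stated objective: alternative
-- what changed: Replaces A's per-token loop testing each index against a branch-built position set by a segment decomposition: each device's net tokens form at most two contiguous runs, so B slices the token list into (nets, passthrough, nets, rest) with per-device lengths (k,s,m), maps the remap helper over the two net slices, and joins the concatenation.
import Mathlib
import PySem

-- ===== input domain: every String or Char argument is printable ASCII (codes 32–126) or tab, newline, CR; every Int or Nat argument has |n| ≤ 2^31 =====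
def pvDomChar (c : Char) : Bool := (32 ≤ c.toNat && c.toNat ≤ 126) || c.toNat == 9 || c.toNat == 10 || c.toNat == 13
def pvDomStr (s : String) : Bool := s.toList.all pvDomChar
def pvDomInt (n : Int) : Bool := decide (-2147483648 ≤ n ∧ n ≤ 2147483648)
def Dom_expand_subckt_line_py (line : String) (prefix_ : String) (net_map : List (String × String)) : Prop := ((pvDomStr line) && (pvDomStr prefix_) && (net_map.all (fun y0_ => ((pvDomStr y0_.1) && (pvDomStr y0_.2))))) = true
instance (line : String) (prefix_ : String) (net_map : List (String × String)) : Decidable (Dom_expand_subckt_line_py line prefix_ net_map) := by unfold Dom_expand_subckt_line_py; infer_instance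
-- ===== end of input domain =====

-- B replaces A's per-index loop over a branch-built position set by a segment view of the
-- line (two contiguous runs of net tokens, sliced out and mapped); objective: alternative
-- decomposition, not speed.

-- ===== PORT A =====
-- A's final loop: result = [new_ref]; for i in range(1, len(tokens)): … ; return ' '.join(result)
def pvA_step (tokens : List String) (prefix_ : String) (net_map : List (String × String))
    (S : PySem.Set Int) (acc : List String) (i : Int) : List String :=
  let tok := PySem.List.pyGetD tokens i ""   -- in range: 1 ≤ i < len(tokens)
  if PySem.Set.contains S i then
    match PySem.Dict.get? (PySem.Dict.mk net_map) tok with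
    | some v => acc ++ [v]
    | none =>
      if tok = "0" ∨ PySem.Str.lower tok = "gnd" then acc ++ [tok]
      else acc ++ [String.ofList (prefix_.toList ++ '_' :: tok.toList)]
  else acc ++ [tok]

def pvA_loop (tokens : List String) (prefix_ : String) (net_map : List (String × String))
    (S : PySem.Set Int) (new_ref : String) : String :=
  PySem.Str.join " " ((PySem.List.pyRange 1 (tokens.length : Int) 1).foldl
    (pvA_step tokens prefix_ net_map S) [new_ref])

def expand_subckt_line_py (line : String) (prefix_ : String) (net_map : List (String × String)) : String :=
  match PySem.Str.split₀ line with
  | [] => ""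
  | ref :: tks =>
    match ref.toList with
    | [] => ""   -- unreachable: words of split() are nonempty
    | c :: rest =>
      let tokens := String.ofList (c :: rest) :: tks
      let first_char := PySem.Chars.upperChar c
      let new_ref : String :=
        if rest.length > 0 then String.ofList (c :: '_' :: prefix_.toList ++ '_' :: rest)
        else String.ofList (c :: '_' :: prefix_.toList)
      if first_char = 'R' ∨ first_char = 'C' ∨ first_char = 'L' ∨ first_char = 'D' then
        pvA_loop tokens prefix_ net_map (PySem.Set.ofList [1, 2]) new_ref
      else if first_char = 'V' ∨ first_char = 'I' then
        pvA_loop tokens prefix_ net_map (PySem.Set.ofList [1, 2]) new_ref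
      else if first_char = 'M' then
        pvA_loop tokens prefix_ net_map (PySem.Set.ofList [1, 2, 3, 4]) new_ref
      else if first_char = 'Q' then
        pvA_loop tokens prefix_ net_map (PySem.Set.ofList [1, 2, 3]) new_ref
      else if first_char = 'E' ∨ first_char = 'G' then
        if 3 < tokens.length ∧
            (PySem.Str.upper (PySem.List.pyGetD tokens 3 "") ∈ (["VCVS", "VCCS", "POLY"] : List String)) then
          pvA_loop tokens prefix_ net_map (PySem.Set.update (PySem.Set.ofList [1, 2]) [4, 5]) new_ref
        else
          pvA_loop tokens prefix_ net_map (PySem.Set.update (PySem.Set.ofList [1, 2]) [3, 4]) new_ref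
      else line   -- unknown prefix, pass through

-- ===== PORT B =====
def pvB_remap (tok : String) (prefix_ : String) (net_map : List (String × String)) : String :=
  match PySem.Dict.get? (PySem.Dict.mk net_map) tok with
  | some v => v
  | none =>
    if tok = "0" ∨ PySem.Str.lower tok = "gnd" then tok
    else String.ofList (prefix_.toList ++ '_' :: tok.toList)

-- Source B's slice decomposition: a,rest2 = rest[:k],rest[k:]; b,rest3 = rest2[:s],rest2[s:];
-- c,d = rest3[:m],rest3[m:]; remap over a and c.  Python list slices with nonnegative
-- bounds are exactly List.take / List.drop (clamping included).
def pvB_parts (rest : List String) (prefix_ : String) (net_map : List (String × String))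
    (k s m : Nat) : List String :=
  let a := rest.take k
  let rest2 := rest.drop k
  let b := rest2.take s
  let rest3 := rest2.drop s
  let c := rest3.take m
  let d := rest3.drop m
  a.map (fun t => pvB_remap t prefix_ net_map) ++ b ++
    c.map (fun t => pvB_remap t prefix_ net_map) ++ d

def expand_subckt_line_py_alt (line : String) (prefix_ : String) (net_map : List (String × String)) : String :=
  match PySem.Str.split₀ line with
  | [] => ""
  | ref :: tks =>
    match ref.toList with
    | [] => ""   -- unreachable: words of split() are nonempty
    | c :: rest =>
      let tokens := String.ofList (c :: rest) :: tks
      let fc := PySem.Chars.upperChar c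
      -- (k, s, m): leading net run, passthrough run, second net run
      let segs? : Option (Nat × Nat × Nat) :=
        if fc ∈ ("RCLDVI".toList) then some (2, 0, 0)   -- fc in 'RCLDVI'
        else if fc = 'M' then some (4, 0, 0)
        else if fc = 'Q' then some (3, 0, 0)
        else if fc ∈ ("EG".toList) then
          some (if 3 < tokens.length ∧
              (PySem.Str.upper (PySem.List.pyGetD tokens 3 "") ∈ (["VCVS", "VCCS", "POLY"] : List String)) then
              (2, 1, 2) else (4, 0, 0))
        else none
      match segs? with
      | none => line
      | some (k, s, m) =>
        let new_ref := String.ofList (c :: '_' :: (prefix_.toList ++ (if rest.length > 0 then '_' :: rest else [])))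
        PySem.Str.join " " (new_ref :: pvB_parts tks prefix_ net_map k s m)

-- ===== PRECONDITION & SPEC =====
def Spec_expand_subckt_line_py (line : String) (prefix_ : String) (net_map : List (String × String)) (out : String) : Prop := out = expand_subckt_line_py_alt line prefix_ net_map
instance (line : String) (prefix_ : String) (net_map : List (String × String)) (out : String) : Decidable (Spec_expand_subckt_line_py line prefix_ net_map out) := by unfold Spec_expand_subckt_line_py; infer_instance

-- ===== CLAIM (what is proved, stated in full; the proofs are below) =====
def Claim_equal_expand_subckt_line_py : Prop := ∀ (line : String) (prefix_ : String) (net_map : List (String × String)), Dom_expand_subckt_line_py line prefix_ net_map → Spec_expand_subckt_line_py line prefix_ net_map (expand_subckt_line_py line prefix_ net_map)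

-- ===== LEMMAS AND PROOFS =====

-- A's inline remap branch equals B's helper
theorem pvA_body_eq (prefix_ : String) (net_map : List (String × String))
    (acc : List String) (tok : String) :
    (match PySem.Dict.get? (PySem.Dict.mk net_map) tok with
      | some v => acc ++ [v]
      | none =>
        if tok = "0" ∨ PySem.Str.lower tok = "gnd" then acc ++ [tok]
        else acc ++ [String.ofList (prefix_.toList ++ '_' :: tok.toList)]) =
    acc ++ [pvB_remap tok prefix_ net_map] := by
  unfold pvB_remap
  cases PySem.Dict.get? (PySem.Dict.mk net_map) tok with
  | some v => rfl
  | none =>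
    by_cases hc : tok = "0" ∨ PySem.Str.lower tok = "gnd" <;> simp [hc]

-- getElem? of B's four-segment concatenation, as a conditional remap at index j
theorem pvB_parts_getElem? (rest : List String) (prefix_ : String)
    (net_map : List (String × String)) (k s m j : Nat) :
    (pvB_parts rest prefix_ net_map k s m)[j]? =
      rest[j]?.map (fun t =>
        if j < k ∨ (k + s ≤ j ∧ j < k + s + m) then pvB_remap t prefix_ net_map else t) := by
  unfold pvB_parts
  simp only [List.getElem?_append, List.getElem?_map, List.getElem?_take, List.getElem?_drop,
    List.length_append, List.length_map, List.length_take, List.length_drop]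
  by_cases hj : j < rest.length
  · rw [List.getElem?_eq_getElem hj, Option.map_some]
    split_ifs <;>
      first
      | rfl
      | omega
      | (rw [show k + (j - min k rest.length) = j from by omega, List.getElem?_eq_getElem hj])
      | (rw [show k + (s + (j - (min k rest.length + min s (rest.length - k)))) = j from by omega,
          List.getElem?_eq_getElem hj]; rfl)
      | (rw [show k + (s + (m + (j - (min k rest.length + min s (rest.length - k) + min m (rest.length - k - s))))) = j from by omega,
          List.getElem?_eq_getElem hj])
  · have hrj : rest[j]? = none := by rw [List.getElem?_eq_none]; omega
    rw [hrj]
    split_ifs <;>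
      first
      | rfl
      | omega
      | (rw [List.getElem?_eq_none (by omega)]; rfl)

-- The crux: A's single indexed loop over position set S equals B's segment slicing,
-- whenever S contains exactly the 1-based positions of the two runs.
theorem pv_main (tokens : List String) (prefix_ new_ref : String)
    (net_map : List (String × String)) (S : PySem.Set Int) (k s m : Nat)
    (hS : ∀ j : Nat, (PySem.Set.contains S (1 + (j : Int)) = true) ↔
      (j < k ∨ (k + s ≤ j ∧ j < k + s + m)))
    (hne : tokens ≠ []) :
    pvA_loop tokens prefix_ net_map S new_ref =
      PySem.Str.join " " (new_ref :: pvB_parts tokens.tail prefix_ net_map k s m) := by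
  unfold pvA_loop
  congr 1
  have hfg : pvA_step tokens prefix_ net_map S =
      (fun (acc : List String) (i : Int) =>
        acc ++ [if PySem.Set.contains S i then
                  pvB_remap (PySem.List.pyGetD tokens i "") prefix_ net_map
                else PySem.List.pyGetD tokens i ""]) := by
    funext acc i
    unfold pvA_step
    split
    · exact pvA_body_eq prefix_ net_map acc (PySem.List.pyGetD tokens i "")
    · rfl
  rw [hfg, PySem.List.foldl_append_singleton_eq_map]
  have hlp : 0 < tokens.length := List.length_pos_of_ne_nil hne
  apply List.ext_getElem?
  intro i
  rw [List.singleton_append]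
  cases i with
  | zero => rfl
  | succ j =>
    simp only [List.getElem?_cons_succ, List.getElem?_map]
    rw [pvB_parts_getElem? tokens.tail prefix_ net_map k s m j]
    by_cases hjlen : j + 1 < tokens.length
    · have hj' : j < (PySem.List.pyRange 1 (tokens.length : Int) 1).length := by
        rw [PySem.List.length_pyRange_one]; omega
      have hjt : j < tokens.tail.length := by
        rw [List.length_tail]; omega
      rw [List.getElem?_eq_getElem hj', List.getElem?_eq_getElem hjt,
        PySem.List.getElem_pyRange_one _ _ _ hj']
      have hget : PySem.List.pyGetD tokens (1 + (j : Int)) "" = tokens.tail[j] := by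
        have h1j : (1 + (j : Int)) = ((j + 1 : Nat) : Int) := by push_cast; ring
        rw [h1j, PySem.List.pyGetD_natCast]
        simp [hjlen, List.getElem_tail]
      simp only [Option.map_some, Option.some.injEq, hget]
      by_cases hin : j < k ∨ (k + s ≤ j ∧ j < k + s + m)
      · rw [if_pos ((hS j).mpr hin), if_pos hin]
      · rw [if_neg (fun hc => hin ((hS j).mp hc)), if_neg hin]
    · have hn1 : (PySem.List.pyRange 1 (tokens.length : Int) 1)[j]? = none := by
        rw [List.getElem?_eq_none]
        rw [PySem.List.length_pyRange_one]; omega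
      have hn2 : tokens.tail[j]? = none := by
        rw [List.getElem?_eq_none]
        rw [List.length_tail]; omega
      rw [hn1, hn2]; rfl

theorem pv_newRef_eq (c : Char) (rest : List Char) (prefix_ : String) :
    (if rest.length > 0 then String.ofList (c :: '_' :: prefix_.toList ++ '_' :: rest)
     else String.ofList (c :: '_' :: prefix_.toList)) =
    String.ofList (c :: '_' :: (prefix_.toList ++ (if rest.length > 0 then '_' :: rest else []))) := by
  split <;> simp

-- ===== VERDICT (by name: the statement is the Claim_ definition above) =====
theorem expand_subckt_line_py_spec : Claim_equal_expand_subckt_line_py := by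
  intro line prefix_ net_map _
  unfold Spec_expand_subckt_line_py expand_subckt_line_py expand_subckt_line_py_alt
  cases PySem.Str.split₀ line with
  | nil => rfl
  | cons ref tks =>
    cases href : ref.toList with
    | nil => simp only [href]
    | cons c rest =>
      simp only [href]
      rw [← pv_newRef_eq c rest prefix_]
      set tokens := String.ofList (c :: rest) :: tks with htok
      have hne : tokens ≠ [] := by simp [htok]
      have htail : tokens.tail = tks := by simp [htok]
      set fc := PySem.Chars.upperChar c with hfc
      set new_ref := (if rest.length > 0 then String.ofList (c :: '_' :: prefix_.toList ++ '_' :: rest)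
        else String.ofList (c :: '_' :: prefix_.toList)) with hnr
      by_cases h1 : fc = 'R' ∨ fc = 'C' ∨ fc = 'L' ∨ fc = 'D'
      · rw [if_pos h1]
        have hmem : fc ∈ ("RCLDVI".toList) := by
          rcases h1 with h | h | h | h <;> rw [h] <;> decide
        rw [if_pos hmem, ← htail]
        exact pv_main tokens prefix_ new_ref net_map (PySem.Set.ofList [1, 2]) 2 0 0
          (by intro j; rw [PySem.Set.contains_iff]; simp; omega) hne
      · rw [if_neg h1]
        by_cases h2 : fc = 'V' ∨ fc = 'I'
        · rw [if_pos h2]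
          have hmem : fc ∈ ("RCLDVI".toList) := by
            rcases h2 with h | h <;> rw [h] <;> decide
          rw [if_pos hmem, ← htail]
          exact pv_main tokens prefix_ new_ref net_map (PySem.Set.ofList [1, 2]) 2 0 0
            (by intro j; rw [PySem.Set.contains_iff]; simp; omega) hne
        · rw [if_neg h2]
          have hnmem : fc ∉ ("RCLDVI".toList) := by
            intro hm
            simp only [show ("RCLDVI".toList) = ['R','C','L','D','V','I'] from rfl, List.mem_cons,
              List.not_mem_nil] at hm
            rcases hm with h|h|h|h|h|h|h
            · exact h1 (Or.inl h)
            · exact h1 (Or.inr (Or.inl h))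
            · exact h1 (Or.inr (Or.inr (Or.inl h)))
            · exact h1 (Or.inr (Or.inr (Or.inr h)))
            · exact h2 (Or.inl h)
            · exact h2 (Or.inr h)
            · exact h
          rw [if_neg hnmem]
          by_cases h3 : fc = 'M'
          · rw [if_pos h3, if_pos h3, ← htail]
            exact pv_main tokens prefix_ new_ref net_map (PySem.Set.ofList [1, 2, 3, 4]) 4 0 0
              (by intro j; rw [PySem.Set.contains_iff]; simp; omega) hne
          · rw [if_neg h3, if_neg h3]
            by_cases h4 : fc = 'Q'
            · rw [if_pos h4, if_pos h4, ← htail]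
              exact pv_main tokens prefix_ new_ref net_map (PySem.Set.ofList [1, 2, 3]) 3 0 0
                (by intro j; rw [PySem.Set.contains_iff]; simp; omega) hne
            · rw [if_neg h4, if_neg h4]
              by_cases h5 : fc = 'E' ∨ fc = 'G'
              · rw [if_pos h5]
                have hmem : fc ∈ ("EG".toList) := by
                  rcases h5 with h | h <;> rw [h] <;> decide
                rw [if_pos hmem]
                by_cases hc : 3 < tokens.length ∧
                    (PySem.Str.upper (PySem.List.pyGetD tokens 3 "") ∈ (["VCVS", "VCCS", "POLY"] : List String))
                · rw [if_pos hc, if_pos hc, ← htail]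
                  exact pv_main tokens prefix_ new_ref net_map
                    (PySem.Set.update (PySem.Set.ofList [1, 2]) [4, 5]) 2 1 2
                    (by intro j; rw [PySem.Set.contains_iff]; simp; omega) hne
                · rw [if_neg hc, if_neg hc, ← htail]
                  exact pv_main tokens prefix_ new_ref net_map
                    (PySem.Set.update (PySem.Set.ofList [1, 2]) [3, 4]) 4 0 0
                    (by intro j; rw [PySem.Set.contains_iff]; simp; omega) hne
              · rw [if_neg h5]
                have hnmem : fc ∉ ("EG".toList) := by
                  intro hm
                  simp only [show ("EG".toList) = ['E','G'] from rfl, List.mem_cons,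
                    List.not_mem_nil] at hm
                  rcases hm with h|h|h
                  · exact h5 (Or.inl h)
                  · exact h5 (Or.inr h)
                  · exact h
                rw [if_neg hnmem]
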